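-- pv_equiv track=rewrite | github.com/SirClashin1/BCChallenges | 25_05_23.py | num_rep
-- ===== SOURCE A (Python) =====
-- def num_rep(string):
--     length = len(string)
--     for i in range(1, length // 2 + 1):
--         sub = string[:i]
--         rep = length // len(sub)
--         if sub * rep == string:
--             return rep
--
--     return 1
-- ===== SOURCE B (Python) =====
-- def num_rep(string):
--     n = len(string)
--     r = 1
--     while (r + 1) * (r + 1) <= n:
--         r += 1
--     for d in range(1, r + 1):
--         if n % d == 0 and 2 * d <= n and string[d:] == string[:n - d]:
--             return n // d
--     for q in range(r, 0, -1):
--         d = n // q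
--         if n % q == 0 and 2 * d <= n and string[d:] == string[:n - d]:
--             return q
--     return 1
-- ===== Notes on version B (the rewrite author's own statement) =====
-- stated objective: faster
-- what changed: A tests every prefix length 1..n//2 by building sub*rep and comparing (O(n^2) total); B enumerates only the divisors of n (small divisors by trial division up to isqrt(n), then the complementary large divisors in increasing order) and tests each candidate period d with the shift check string[d:] == string[:n-d], so only O(d(n)) length-n comparisons are made.
import Mathlib
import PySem

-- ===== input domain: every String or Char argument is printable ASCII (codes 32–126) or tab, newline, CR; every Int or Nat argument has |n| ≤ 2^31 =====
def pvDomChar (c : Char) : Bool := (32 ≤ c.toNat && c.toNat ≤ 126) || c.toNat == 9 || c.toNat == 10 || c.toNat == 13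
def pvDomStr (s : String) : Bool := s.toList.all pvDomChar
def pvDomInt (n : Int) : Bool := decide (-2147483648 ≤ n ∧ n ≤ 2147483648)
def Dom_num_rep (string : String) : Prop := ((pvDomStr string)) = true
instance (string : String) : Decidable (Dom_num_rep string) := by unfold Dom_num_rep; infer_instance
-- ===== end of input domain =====

-- B replaces A's scan of every prefix length 1..n//2 by enumerating only the divisors of n
-- (trial division up to isqrt(n)) and testing each candidate period d with the shift check
-- string[d:] == string[:n-d]; objective: faster (far fewer candidate periods are tested).

-- ===== PORT A =====
def numRepGoA (string : String) (length : Int) : List Int → Int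
  | [] => 1
  | i :: rest =>
      let sub : List Char := PySem.List.slice string.toList none (some i)  -- string[:i]
      let rep : Int := PySem.Int.floordiv length (sub.length : Int)        -- length // len(sub)
      if PySem.List.pyRepeat sub rep = string.toList then rep              -- sub * rep == string
      else numRepGoA string length rest

def num_rep (string : String) : Int :=
  let length : Int := PySem.Str.len string
  numRepGoA string length (PySem.List.pyRange 1 (PySem.Int.floordiv length 2 + 1) 1)

-- ===== PORT B =====
-- while (r + 1) * (r + 1) <= n: r += 1
def isqrtLoopB (n r : Int) : Int :=
  if (r + 1) * (r + 1) ≤ n then isqrtLoopB n (r + 1) else r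
termination_by (n - r).toNat
decreasing_by
  rename_i h
  have h0 : (0:Int) ≤ (r + 1) * (r + 1) := mul_self_nonneg _
  have hrn : r < n := by
    by_cases hr : 0 ≤ r
    · nlinarith
    · omega
  omega

-- for d in range(1, r + 1): if n % d == 0 and 2*d <= n and string[d:] == string[:n-d]: return n // d
def numRepLoop1B (string : String) (n : Int) : List Int → Option Int
  | [] => none
  | d :: rest =>
      if PySem.Int.mod n d = 0 ∧ 2 * d ≤ n ∧
          PySem.List.slice string.toList (some d) none =
            PySem.List.slice string.toList none (some (n - d)) then
        some (PySem.Int.floordiv n d)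
      else numRepLoop1B string n rest

-- for q in range(r, 0, -1): d = n // q; if n % q == 0 and 2*d <= n and string[d:] == string[:n-d]: return q
def numRepLoop2B (string : String) (n : Int) : List Int → Int
  | [] => 1
  | q :: rest =>
      let d : Int := PySem.Int.floordiv n q
      if PySem.Int.mod n q = 0 ∧ 2 * d ≤ n ∧
          PySem.List.slice string.toList (some d) none =
            PySem.List.slice string.toList none (some (n - d)) then q
      else numRepLoop2B string n rest

def num_rep_alt (string : String) : Int :=
  let n : Int := PySem.Str.len string
  let r : Int := isqrtLoopB n 1
  match numRepLoop1B string n (PySem.List.pyRange 1 (r + 1) 1) with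
  | some v => v
  | none => numRepLoop2B string n (PySem.List.pyRange r 0 (-1))

-- ===== PRECONDITION & SPEC =====
def Spec_num_rep (string : String) (out : Int) : Prop := out = num_rep_alt string
instance (string : String) (out : Int) : Decidable (Spec_num_rep string out) := by unfold Spec_num_rep; infer_instance

-- ===== CLAIM (what is proved, stated in full; the proofs are below) =====
def Claim_equal_num_rep : Prop := ∀ (string : String), Dom_num_rep string → Spec_num_rep string (num_rep string)

-- ===== LEMMAS AND PROOFS =====

-- d is a period witness: d divides |l|, the period repeats at least twice, and the shift check holds
def Pb (l : List Char) (d : ℕ) : Bool :=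
  decide (l.length % d = 0 ∧ 2 * d ≤ l.length ∧ l.drop d = l.take (l.length - d))

def Qb (l : List Char) (q : ℕ) : Bool := decide (q ∣ l.length) && Pb l (l.length / q)

theorem Pb_bounds {l : List Char} {d : ℕ} (hl : 1 ≤ l.length) (h : Pb l d = true) :
    1 ≤ d ∧ d ≤ l.length / 2 ∧ d ∣ l.length := by
  simp only [Pb, decide_eq_true_eq] at h
  obtain ⟨h1, h2, -⟩ := h
  have hd : d ∣ l.length := Nat.dvd_of_mod_eq_zero h1
  refine ⟨?_, by omega, hd⟩
  rcases Nat.eq_zero_or_pos d with rfl | hp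
  · rw [Nat.mod_zero] at h1; omega
  · exact hp

theorem find?_min {p : ℕ → Bool} {L : List ℕ} {d0 : ℕ} (hs : L.Pairwise (· < ·))
    (hm : d0 ∈ L) (hp : p d0 = true) (hmin : ∀ x ∈ L, p x = true → d0 ≤ x) :
    L.find? p = some d0 := by
  induction L with
  | nil => simp at hm
  | cons a t ih =>
    rcases List.pairwise_cons.1 hs with ⟨ha, ht⟩
    by_cases hpa : p a = true
    · have h1 : d0 ≤ a := hmin a (by simp) hpa
      have : d0 = a := by
        rcases List.mem_cons.1 hm with rfl | hmem
        · rfl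
        · exact absurd (ha _ hmem) (by omega)
      subst this
      simp [List.find?, hpa]
    · have hd0 : d0 ∈ t := by
        rcases List.mem_cons.1 hm with rfl | hmem
        · exact absurd hp hpa
        · exact hmem
      have hpa' : p a = false := eq_false_of_ne_true hpa
      simp only [List.find?, hpa']
      exact ih ht hd0 (fun x hx hpx => hmin x (by simp [hx]) hpx)

theorem find?_max {p : ℕ → Bool} {L : List ℕ} {q0 : ℕ} (hs : L.Pairwise (· > ·))
    (hm : q0 ∈ L) (hp : p q0 = true) (hmax : ∀ x ∈ L, p x = true → x ≤ q0) :
    L.find? p = some q0 := by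
  induction L with
  | nil => simp at hm
  | cons a t ih =>
    rcases List.pairwise_cons.1 hs with ⟨ha, ht⟩
    by_cases hpa : p a = true
    · have h1 : a ≤ q0 := hmax a (by simp) hpa
      have : q0 = a := by
        rcases List.mem_cons.1 hm with rfl | hmem
        · rfl
        · have := ha _ hmem; omega
      subst this
      simp [List.find?, hpa]
    · have hd0 : q0 ∈ t := by
        rcases List.mem_cons.1 hm with rfl | hmem
        · exact absurd hp hpa
        · exact hmem
      have hpa' : p a = false := eq_false_of_ne_true hpa
      simp only [List.find?, hpa']
      exact ih ht hd0 (fun x hx hpx => hmax x (by simp [hx]) hpx)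

theorem find?_some_min {p : ℕ → Bool} {L : List ℕ} {d0 : ℕ} (hs : L.Pairwise (· < ·))
    (h : L.find? p = some d0) : p d0 = true ∧ d0 ∈ L ∧ ∀ x ∈ L, p x = true → d0 ≤ x := by
  induction L with
  | nil => simp at h
  | cons a t ih =>
    rcases List.pairwise_cons.1 hs with ⟨ha, ht⟩
    by_cases hpa : p a = true
    · simp only [List.find?, hpa] at h
      obtain rfl : a = d0 := by simpa using h
      refine ⟨hpa, by simp, fun x hx _ => ?_⟩
      rcases List.mem_cons.1 hx with rfl | hmem
      · exact le_refl x
      · exact le_of_lt (ha _ hmem)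
    · have hpa' : p a = false := eq_false_of_ne_true hpa
      simp only [List.find?, hpa'] at h
      obtain ⟨h1, h2, h3⟩ := ih ht h
      refine ⟨h1, by simp [h2], fun x hx hpx => ?_⟩
      rcases List.mem_cons.1 hx with rfl | hmem
      · exact absurd hpx hpa
      · exact h3 x hmem hpx

theorem pyRange_up_natCast (k : ℕ) :
    PySem.List.pyRange 1 ((k : Int) + 1) 1 = (List.range' 1 k).map (Nat.cast : ℕ → Int) := by
  rw [PySem.List.pyRange_one]
  have hk : ((k : Int) + 1 - 1).toNat = k := by omega
  rw [hk]
  apply List.ext_getElem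
  · simp
  · intro i h1 h2
    simp only [List.getElem_map, List.getElem_range, List.getElem_range']
    omega

theorem pyRange_down_natCast (R : ℕ) :
    PySem.List.pyRange (R : Int) 0 (-1) = ((List.range' 1 R).reverse).map (Nat.cast : ℕ → Int) := by
  rw [PySem.List.pyRange_neg_one]
  have h0 : ((R : Int) - 0).toNat = R := by omega
  rw [h0]
  apply List.ext_getElem
  · simp
  · intro i h1 h2
    simp only [List.length_map, List.length_range, List.length_reverse, List.length_range'] at h1 h2
    simp only [List.getElem_map, List.getElem_range, List.getElem_reverse,
      List.length_range', List.getElem_range']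
    omega

theorem isqrt_spec (n r : Int) :
    r ≤ isqrtLoopB n r ∧ n < (isqrtLoopB n r + 1) * (isqrtLoopB n r + 1) := by
  induction r using isqrtLoopB.induct (n := n) with
  | case1 r h ih =>
    rw [isqrtLoopB, if_pos h]
    exact ⟨by omega, ih.2⟩
  | case2 r h =>
    rw [isqrtLoopB, if_neg h]
    exact ⟨le_refl _, by omega⟩

theorem periodic_iff (i : ℕ) (_hi : 1 ≤ i) :
    ∀ (k : ℕ) (l : List Char), l.length = k * i →
      ((List.replicate k (l.take i)).flatten = l ↔ l.drop i = l.take (l.length - i)) := by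
  intro k
  induction k with
  | zero =>
    intro l hl
    have : l = [] := List.eq_nil_of_length_eq_zero (by omega)
    subst this
    simp
  | succ k ih =>
    intro l hl
    have hmul : (k + 1) * i = k * i + i := by ring
    have hiN : i ≤ l.length := by omega
    set t := l.take i with ht
    have hlt : t.length = i := by simp [ht]; omega
    have hni : l.length - i = k * i := by omega
    have hXlen : ((List.replicate k t).flatten).length = k * i := by
      simp [hlt, Nat.mul_comm]
    have hcomm : t ++ (List.replicate k t).flatten = (List.replicate k t).flatten ++ t := by
      rw [← List.flatten_cons, ← List.replicate_succ, List.replicate_succ', List.flatten_append]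
      simp
    constructor
    · intro h
      rw [List.replicate_succ, List.flatten_cons] at h
      have hdrop : l.drop i = (List.replicate k t).flatten := by
        conv_lhs => rw [← h]
        rw [List.drop_append_of_le_length (by omega)]
        simp [hlt]
      have htake : l.take (l.length - i) = (List.replicate k t).flatten := by
        rw [hni]
        conv_lhs => rw [← h, hcomm]
        rw [← hXlen]
        exact List.take_left
      rw [hdrop, htake]
    · intro h
      rcases Nat.eq_zero_or_pos k with rfl | hk
      · have hli : l.length = i := by omega
        rw [List.replicate_succ]
        simp [ht, List.take_of_length_le (by omega : l.length ≤ i)]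
      · have h2i : 2 * i ≤ l.length := by nlinarith
        have hvlen : (l.drop i).length = k * i := by rw [List.length_drop]; omega
        have hv : (List.replicate k ((l.drop i).take i)).flatten = l.drop i := by
          apply (ih (l.drop i) hvlen).2
          have e1 : (l.drop i).drop i = (l.take (l.length - i)).drop i := by rw [h]
          have e2 : (l.take (l.length - i)).drop i = (l.drop i).take (l.length - i - i) := by
            rw [List.drop_take]
          have e3 : (l.drop i).length - i = l.length - i - i := by
            rw [List.length_drop]
          rw [e1, e2, e3]
        have htakev : (l.drop i).take i = t := by
          rw [h, List.take_take, ht]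
          congr 1
          omega
        rw [htakev] at hv
        rw [List.replicate_succ, List.flatten_cons, hv]
        exact List.take_append_drop i l

-- A's check, for 1 ≤ d ≤ n/2, is exactly Pb
theorem checkA_iff (l : List Char) (d : ℕ) (h1 : 1 ≤ d) (h2 : d ≤ l.length / 2) :
    ((List.replicate (l.length / d) (l.take d)).flatten = l ↔ Pb l d = true) := by
  have h2' : 2 * d ≤ l.length := by omega
  by_cases hdvd : d ∣ l.length
  · have hmul : l.length = (l.length / d) * d := (Nat.div_mul_cancel hdvd).symm
    rw [periodic_iff d h1 (l.length / d) l hmul]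
    have hmod : l.length % d = 0 := by
      obtain ⟨c, hc⟩ := hdvd
      rw [hc]
      exact Nat.mul_mod_right d c
    simp only [Pb, decide_eq_true_eq]
    constructor
    · intro x
      exact ⟨hmod, h2', x⟩
    · rintro ⟨-, -, x⟩
      exact x
  · have hdN : d ≤ l.length := by omega
    have hlen : ((List.replicate (l.length / d) (l.take d)).flatten).length
        = (l.length / d) * d := by
      simp [List.length_take, Nat.min_eq_left hdN, Nat.mul_comm]
    have hne : (l.length / d) * d ≠ l.length := by
      intro hco
      exact hdvd (Dvd.intro_left _ hco)
    apply iff_of_false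
    · intro hco
      apply hne
      rw [← hlen, hco]
    · simp only [Pb, decide_eq_true_eq]
      rintro ⟨hmod, -, -⟩
      exact hdvd (Nat.dvd_of_mod_eq_zero hmod)

theorem bridge1 (l : List Char) (d : ℕ) :
    (PySem.Int.mod (l.length : Int) (d : Int) = 0 ∧ 2 * (d : Int) ≤ (l.length : Int) ∧
      PySem.List.slice l (some (d : Int)) none =
        PySem.List.slice l none (some ((l.length : Int) - (d : Int)))) ↔ Pb l d = true := by
  rw [PySem.Int.mod_natCast, PySem.List.slice_from_natCast]
  by_cases hdN : d ≤ l.length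
  · have hc : (l.length : Int) - (d : Int) = ((l.length - d : ℕ) : Int) := by omega
    rw [hc, PySem.List.slice_to_natCast]
    simp only [Pb, decide_eq_true_eq]
    constructor
    · rintro ⟨a, b, c⟩
      exact ⟨by exact_mod_cast a, by exact_mod_cast b, c⟩
    · rintro ⟨a, b, c⟩
      exact ⟨by exact_mod_cast a, by exact_mod_cast b, c⟩
  · constructor
    · rintro ⟨-, b, -⟩
      exact absurd b (by omega)
    · intro h
      simp only [Pb, decide_eq_true_eq] at h
      omega

theorem mod_eq_zero_of_dvd {a b : ℕ} (h : a ∣ b) : b % a = 0 := by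
  obtain ⟨c, hc⟩ := h
  rw [hc]
  exact Nat.mul_mod_right a c

theorem goA_eq (s : String) (L : List ℕ) (hL : ∀ d ∈ L, 1 ≤ d ∧ d ≤ s.toList.length / 2) :
    numRepGoA s (s.toList.length : Int) (L.map (Nat.cast : ℕ → Int)) =
      match L.find? (Pb s.toList) with
      | some d => ((s.toList.length / d : ℕ) : Int)
      | none => 1 := by
  induction L with
  | nil => simp [numRepGoA]
  | cons d L ih =>
    obtain ⟨hd1, hd2⟩ := hL d (by simp)
    have hdN : d ≤ s.toList.length := by omega
    have hsub : PySem.List.slice s.toList none (some (d : Int)) = s.toList.take d :=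
      PySem.List.slice_to_natCast _ d
    simp only [List.map_cons, numRepGoA, hsub]
    have hlen : ((s.toList.take d).length : Int) = ((d : ℕ) : Int) := by
      rw [List.length_take, Nat.min_eq_left hdN]
    rw [hlen, PySem.Int.floordiv_natCast]
    have hrep : PySem.List.pyRepeat (s.toList.take d) ((s.toList.length / d : ℕ) : Int)
        = (List.replicate (s.toList.length / d) (s.toList.take d)).flatten := by
      simp only [PySem.List.pyRepeat, Int.toNat_natCast]
    rw [hrep]
    by_cases hc : Pb s.toList d = true
    · rw [if_pos ((checkA_iff _ d hd1 hd2).2 hc)]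
      simp [List.find?, hc]
    · rw [if_neg (fun hcon => hc ((checkA_iff _ d hd1 hd2).1 hcon))]
      simp only [List.find?, eq_false_of_ne_true hc]
      exact ih (fun x hx => hL x (by simp [hx]))

theorem loop1_eq (s : String) (L : List ℕ) :
    numRepLoop1B s (s.toList.length : Int) (L.map (Nat.cast : ℕ → Int)) =
      (L.find? (Pb s.toList)).map (fun d => ((s.toList.length / d : ℕ) : Int)) := by
  induction L with
  | nil => simp [numRepLoop1B]
  | cons d L ih =>
    simp only [List.map_cons, numRepLoop1B]
    by_cases hc : Pb s.toList d = true
    · rw [if_pos ((bridge1 s.toList d).2 hc)]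
      rw [PySem.Int.floordiv_natCast]
      simp [List.find?, hc]
    · rw [if_neg (fun hcon => hc ((bridge1 s.toList d).1 hcon))]
      simp only [List.find?, eq_false_of_ne_true hc]
      exact ih

theorem bridge2 (l : List Char) (q : ℕ) :
    (PySem.Int.mod (l.length : Int) (q : Int) = 0 ∧
      2 * PySem.Int.floordiv (l.length : Int) (q : Int) ≤ (l.length : Int) ∧
      PySem.List.slice l (some (PySem.Int.floordiv (l.length : Int) (q : Int))) none =
        PySem.List.slice l none
          (some ((l.length : Int) - PySem.Int.floordiv (l.length : Int) (q : Int))))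
    ↔ Qb l q = true := by
  rw [PySem.Int.mod_natCast, PySem.Int.floordiv_natCast, PySem.List.slice_from_natCast]
  have hdN : l.length / q ≤ l.length := Nat.div_le_self _ _
  have hcc : (l.length : Int) - ((l.length / q : ℕ) : Int)
      = ((l.length - l.length / q : ℕ) : Int) := by omega
  rw [hcc, PySem.List.slice_to_natCast]
  simp only [Qb, Pb, Bool.and_eq_true, decide_eq_true_eq]
  constructor
  · rintro ⟨a, b, c⟩
    have hdvd : q ∣ l.length := Nat.dvd_of_mod_eq_zero (by exact_mod_cast a)
    have hmod : l.length % (l.length / q) = 0 :=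
      mod_eq_zero_of_dvd (Nat.div_dvd_of_dvd hdvd)
    exact ⟨hdvd, hmod, by exact_mod_cast b, c⟩
  · rintro ⟨hdvd, ⟨-, b, c⟩⟩
    refine ⟨?_, by exact_mod_cast b, c⟩
    have : l.length % q = 0 := mod_eq_zero_of_dvd hdvd
    exact_mod_cast this

theorem loop2_eq (s : String) (L : List ℕ) :
    numRepLoop2B s (s.toList.length : Int) (L.map (Nat.cast : ℕ → Int)) =
      match L.find? (Qb s.toList) with
      | some q => (q : Int)
      | none => 1 := by
  induction L with
  | nil => simp [numRepLoop2B]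
  | cons q L ih =>
    simp only [List.map_cons, numRepLoop2B]
    by_cases hc : Qb s.toList q = true
    · rw [if_pos ((bridge2 s.toList q).2 hc)]
      simp [List.find?, hc]
    · rw [if_neg (fun hcon => hc ((bridge2 s.toList q).1 hcon))]
      simp only [List.find?, eq_false_of_ne_true hc]
      exact ih

theorem num_rep_eq (s : String) :
    num_rep s =
      match (List.range' 1 (s.toList.length / 2)).find? (Pb s.toList) with
      | some d => ((s.toList.length / d : ℕ) : Int)
      | none => 1 := by
  rw [show num_rep s = numRepGoA s (PySem.Str.len s)
        (PySem.List.pyRange 1 (PySem.Int.floordiv (PySem.Str.len s) 2 + 1) 1) from rfl]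
  rw [PySem.Str.len_eq]
  have h2 : PySem.Int.floordiv ((s.toList.length : ℕ) : Int) 2
      = ((s.toList.length / 2 : ℕ) : Int) := by
    have := PySem.Int.floordiv_natCast s.toList.length 2
    exact_mod_cast this
  rw [h2, pyRange_up_natCast]
  apply goA_eq
  intro d hd
  rw [List.mem_range'_1] at hd
  omega

theorem num_rep_alt_eq (s : String) :
    num_rep_alt s =
      match (List.range' 1 (s.toList.length / 2)).find? (Pb s.toList) with
      | some d => ((s.toList.length / d : ℕ) : Int)
      | none => 1 := by
  rw [show num_rep_alt s =
        (match numRepLoop1B s (PySem.Str.len s)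
            (PySem.List.pyRange 1 (isqrtLoopB (PySem.Str.len s) 1 + 1) 1) with
          | some v => v
          | none => numRepLoop2B s (PySem.Str.len s)
              (PySem.List.pyRange (isqrtLoopB (PySem.Str.len s) 1) 0 (-1))) from rfl]
  rw [PySem.Str.len_eq]
  obtain ⟨hr1, hr2⟩ := isqrt_spec ((s.toList.length : ℕ) : Int) 1
  set R : Int := isqrtLoopB ((s.toList.length : ℕ) : Int) 1 with hRdef
  have hcast : R = ((R.toNat : ℕ) : Int) := by omega
  set Rn : ℕ := R.toNat with hRndef
  have hRn1 : 1 ≤ Rn := by omega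
  have hNlt : s.toList.length < (Rn + 1) * (Rn + 1) := by
    have he : (((Rn + 1) * (Rn + 1) : ℕ) : Int) = (R + 1) * (R + 1) := by
      push_cast
      rw [← hcast]
    have h := hr2
    rw [← he] at h
    exact_mod_cast h
  rw [hcast, pyRange_up_natCast Rn, pyRange_down_natCast Rn, loop1_eq, loop2_eq]
  by_cases hN0 : s.toList.length = 0
  · -- empty string: both sides are 1
    have hl : s.toList = [] := List.eq_nil_of_length_eq_zero hN0
    have hRn : Rn = 1 := by
      have h01 : isqrtLoopB ((0 : ℕ) : Int) 1 = 1 := by rw [isqrtLoopB]; norm_num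
      have hR1 : R = 1 := by rw [hRdef, hN0]; exact h01
      omega
    have hPb1 : Pb s.toList 1 = false := by
      simp only [Pb, decide_eq_false_iff_not]
      rintro ⟨-, h2, -⟩
      omega
    have hQb1 : Qb s.toList 1 = true := by
      simp only [Qb, Pb, Bool.and_eq_true, decide_eq_true_eq, hl]
      exact ⟨⟨0, by simp⟩, by simp, by simp, by simp⟩
    have hfind1 : (List.range' 1 Rn).find? (Pb s.toList) = none := by
      rw [hRn]
      simp [List.range', List.find?, hPb1]
    have hfind2 : ((List.range' 1 Rn).reverse).find? (Qb s.toList) = some 1 := by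
      rw [hRn]
      simp [List.range', hQb1]
    have hhalf : s.toList.length / 2 = 0 := by omega
    rw [hfind1, hfind2, hhalf]
    simp [List.range']
  · -- nonempty string
    have hN1 : 1 ≤ s.toList.length := by omega
    rcases hfind : (List.range' 1 (s.toList.length / 2)).find? (Pb s.toList) with _ | d0
    · -- no period at all
      have hno : ∀ x, Pb s.toList x = false := by
        intro x
        by_contra hx
        have hx' : Pb s.toList x = true := by
          cases h' : Pb s.toList x
          · exact absurd h' hx
          · rfl
        obtain ⟨hc1, hc2, -⟩ := Pb_bounds hN1 hx'
        have hmem : x ∈ List.range' 1 (s.toList.length / 2) :=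
          List.mem_range'_1.2 ⟨hc1, by omega⟩
        exact (List.find?_eq_none.1 hfind x hmem) hx'
      have h1 : (List.range' 1 Rn).find? (Pb s.toList) = none :=
        List.find?_eq_none.2 (fun x _ => by simp [hno x])
      have h2 : ((List.range' 1 Rn).reverse).find? (Qb s.toList) = none := by
        apply List.find?_eq_none.2
        intro x _
        simp [Qb, hno]
      rw [h1, h2]
      simp
    · -- least period d0
      obtain ⟨hp0, hmem0, hmin0⟩ :=
        find?_some_min (List.pairwise_lt_range' 1) hfind
      obtain ⟨hb1, hb2, hbdvd⟩ := Pb_bounds hN1 hp0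
      have hmin : ∀ x, Pb s.toList x = true → d0 ≤ x := by
        intro x hx
        obtain ⟨hx1, hx2, -⟩ := Pb_bounds hN1 hx
        exact hmin0 x (List.mem_range'_1.2 ⟨hx1, by omega⟩) hx
      by_cases hdR : d0 ≤ Rn
      · -- found by the first loop
        have h1 : (List.range' 1 Rn).find? (Pb s.toList) = some d0 := by
          apply find?_min (List.pairwise_lt_range' 1)
            (List.mem_range'_1.2 ⟨hb1, by omega⟩) hp0
          intro x _ hx
          exact hmin x hx
        rw [h1]
        simp
      · -- found by the second loop, as q0 = n / d0
        have h1 : (List.range' 1 Rn).find? (Pb s.toList) = none := by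
          apply List.find?_eq_none.2
          intro x hxm hx
          have := hmin x hx
          rw [List.mem_range'_1] at hxm
          omega
        set q0 : ℕ := s.toList.length / d0 with hq0def
        have hq0dvd : q0 ∣ s.toList.length := Nat.div_dvd_of_dvd hbdvd
        have hd0N : 2 * d0 ≤ s.toList.length := by omega
        have hq02 : 2 ≤ q0 := (Nat.le_div_iff_mul_le (by omega)).2 (by omega)
        have hq0R : q0 ≤ Rn := by
          have ha : q0 ≤ s.toList.length / (Rn + 1) :=
            Nat.div_le_div_left (by omega) (by omega)
          have hb : s.toList.length / (Rn + 1) < Rn + 1 :=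
            (Nat.div_lt_iff_lt_mul (by omega)).2 hNlt
          omega
        have hNq0 : s.toList.length / q0 = d0 := Nat.div_div_self hbdvd (by omega)
        have hq0p : Qb s.toList q0 = true := by
          simp only [Qb, Bool.and_eq_true, decide_eq_true_eq]
          refine ⟨hq0dvd, ?_⟩
          rw [hNq0]
          exact hp0
        have h2 : ((List.range' 1 Rn).reverse).find? (Qb s.toList) = some q0 := by
          apply find?_max (List.pairwise_reverse.2 (List.pairwise_lt_range' 1))
            (List.mem_reverse.2 (List.mem_range'_1.2 ⟨by omega, by omega⟩)) hq0p
          intro x hxm hx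
          simp only [Qb, Bool.and_eq_true, decide_eq_true_eq] at hx
          obtain ⟨hxdvd, hxp⟩ := hx
          rw [List.mem_reverse, List.mem_range'_1] at hxm
          have hx1 : 1 ≤ x := by omega
          have hdle : d0 ≤ s.toList.length / x := hmin _ hxp
          have hmul : d0 * x ≤ s.toList.length :=
            (Nat.le_div_iff_mul_le (by omega)).1 hdle
          have : x ≤ s.toList.length / d0 :=
            (Nat.le_div_iff_mul_le (by omega)).2 (by rw [Nat.mul_comm]; exact hmul)
          omega
        rw [h1, h2]
        simp only [Option.map_none]
        rw [hq0def]

-- ===== VERDICT (by name: the statement is the Claim_ definition above) =====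
theorem num_rep_spec : Claim_equal_num_rep := by
  intro s _
  unfold Spec_num_rep
  rw [num_rep_eq, num_rep_alt_eq]
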